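-- pv_equiv track=rewrite | github.com/YufeiCui/CSCA48 | tutorials/t7/vowel_count.py | has_more_vowel
-- ===== SOURCE A (Python) =====
-- vowels = ['a', 'e', 'i', 'o', 'u', 'A', 'E', 'I', 'O', 'U']
--
-- def has_more_vowel(a_string, c_count, v_count):
--     '''(str, int, int) -> int
--     This recursive function determines if a given string has more vowels
--     than consonants.
--     c_count represent the number of consonant in a_string
--     v_count represent the number of vowels in a_string'''
--     if len(a_string) == 0:
--         return v_count > c_count
--     if a_string[0] in vowels:
--         v_count += 1
--     else:
--         c_count += 1
--     return has_more_vowel(a_string[1:], c_count, v_count)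
-- ===== SOURCE B (Python) =====
-- vowels = ['a', 'e', 'i', 'o', 'u', 'A', 'E', 'I', 'O', 'U']
--
-- def has_more_vowel(a_string, c_count, v_count):
--     for ch in a_string:
--         if ch in vowels:
--             v_count += 1
--         else:
--             c_count += 1
--     return v_count > c_count
-- ===== Notes on version B (the rewrite author's own statement) =====
-- stated objective: faster
-- what changed: Replaced the tail recursion that slices the string on every call with a single iterative for-loop over the characters accumulating the two counters, comparing once at the end.
import Mathlib
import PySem

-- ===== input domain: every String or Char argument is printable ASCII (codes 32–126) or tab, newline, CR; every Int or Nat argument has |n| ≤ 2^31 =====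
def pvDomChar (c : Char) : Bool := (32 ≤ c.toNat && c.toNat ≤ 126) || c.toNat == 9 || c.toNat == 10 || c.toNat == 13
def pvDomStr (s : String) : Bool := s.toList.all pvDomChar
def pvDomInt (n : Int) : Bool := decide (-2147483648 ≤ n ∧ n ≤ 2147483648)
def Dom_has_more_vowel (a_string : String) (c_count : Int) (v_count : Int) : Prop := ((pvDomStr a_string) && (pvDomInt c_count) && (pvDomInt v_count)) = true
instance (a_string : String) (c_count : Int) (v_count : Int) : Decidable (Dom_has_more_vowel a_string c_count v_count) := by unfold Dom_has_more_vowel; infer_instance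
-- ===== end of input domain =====

-- B replaces A's slice-per-call recursion with one iterative loop over the characters; return value only.

-- ===== PORT A =====
def pyVowels : List Char := ['a', 'e', 'i', 'o', 'u', 'A', 'E', 'I', 'O', 'U']

-- recursion on the character list: a_string[0] is the head, a_string[1:] the tail
def hmvA : List Char → Int → Int → Bool
  | [], c_count, v_count => decide (v_count > c_count)
  | ch :: rest, c_count, v_count =>
      if ch ∈ pyVowels then hmvA rest c_count (v_count + 1)
      else hmvA rest (c_count + 1) v_count

def has_more_vowel (a_string : String) (c_count : Int) (v_count : Int) : Bool :=
  hmvA a_string.toList c_count v_count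

-- ===== PORT B =====
def has_more_vowel_alt (a_string : String) (c_count : Int) (v_count : Int) : Bool :=
  let (c, v) := a_string.toList.foldl
    (fun (st : Int × Int) ch =>
      if ch ∈ pyVowels then (st.1, st.2 + 1) else (st.1 + 1, st.2))
    (c_count, v_count)
  decide (v > c)

-- ===== PRECONDITION & SPEC =====
def Spec_has_more_vowel (a_string : String) (c_count : Int) (v_count : Int) (out : Bool) : Prop := out = has_more_vowel_alt a_string c_count v_count
instance (a_string : String) (c_count : Int) (v_count : Int) (out : Bool) : Decidable (Spec_has_more_vowel a_string c_count v_count out) := by unfold Spec_has_more_vowel; infer_instance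

-- ===== CLAIM (what is proved, stated in full; the proofs are below) =====
def Claim_equal_has_more_vowel : Prop := ∀ (a_string : String) (c_count : Int) (v_count : Int), Dom_has_more_vowel a_string c_count v_count → Spec_has_more_vowel a_string c_count v_count (has_more_vowel a_string c_count v_count)

-- ===== LEMMAS AND PROOFS =====
theorem hmvA_eq_fold (l : List Char) (c v : Int) :
    hmvA l c v =
      (let (c', v') := l.foldl
        (fun (st : Int × Int) ch =>
          if ch ∈ pyVowels then (st.1, st.2 + 1) else (st.1 + 1, st.2))
        (c, v)
       decide (v' > c')) := by
  induction l generalizing c v with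
  | nil => rfl
  | cons ch rest ih =>
    simp only [hmvA, List.foldl]
    by_cases h : ch ∈ pyVowels <;> simp [h, ih]

-- ===== VERDICT (by name: the statement is the Claim_ definition above) =====
theorem has_more_vowel_spec : Claim_equal_has_more_vowel := by
  intro s c v _
  unfold Spec_has_more_vowel has_more_vowel has_more_vowel_alt
  exact hmvA_eq_fold s.toList c v
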